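-- pv_equiv track=rewrite | github.com/leochlon/procedural_chlon2026 | experiments/prediction3_checkpointing/checkpoint_multitask_smoke.py | eval_ops
-- ===== SOURCE A (Python) =====
-- def eval_ops(ops):
--     """Helper to evaluate arithmetic operations."""
--     val = 0
--     for op, n in ops:
--         if op == '+':
--             val += n
--         elif op == '-':
--             val -= n
--         elif op == '*':
--             val *= n
--     return val
-- ===== SOURCE B (Python) =====
-- def eval_ops(ops):
--     """Helper to evaluate arithmetic operations.
--
--     Composes the ops right-to-left as a single affine map x -> m*x + c
--     (each op is affine on the accumulator), then evaluates it at the seed 0.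
--     """
--     m, c = 1, 0  # the affine map the remaining (suffix) ops apply
--     for op, n in reversed(ops):
--         if op == '+':
--             c += m * n
--         elif op == '-':
--             c -= m * n
--         elif op == '*':
--             m *= n
--     return c
-- ===== Notes on version B (the rewrite author's own statement) =====
-- stated objective: alternative
-- what changed: Instead of folding an accumulator forward, B traverses the ops in reverse composing them into one affine map x -> m*x + c (maintaining the coefficients m and c) and returns its value at the seed 0.
import Mathlib
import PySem

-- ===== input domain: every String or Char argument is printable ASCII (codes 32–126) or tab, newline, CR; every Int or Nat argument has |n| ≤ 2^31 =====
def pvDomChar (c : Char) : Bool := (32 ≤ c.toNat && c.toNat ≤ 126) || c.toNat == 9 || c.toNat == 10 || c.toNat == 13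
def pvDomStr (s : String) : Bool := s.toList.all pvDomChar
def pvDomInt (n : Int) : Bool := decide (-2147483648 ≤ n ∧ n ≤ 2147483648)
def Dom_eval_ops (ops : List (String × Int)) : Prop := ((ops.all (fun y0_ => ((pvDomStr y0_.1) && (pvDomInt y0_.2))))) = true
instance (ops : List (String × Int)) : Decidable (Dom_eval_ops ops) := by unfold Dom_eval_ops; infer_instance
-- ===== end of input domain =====

-- ===== PORT A =====
-- Header: B composes the ops in reverse into one affine map x ↦ m*x + c and evaluates it at 0 (alternative algorithm, same cost).
def eval_ops (ops : List (String × Int)) : Int :=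
  ops.foldl (fun val p =>
    if p.1 == "+" then val + p.2
    else if p.1 == "-" then val - p.2
    else if p.1 == "*" then val * p.2
    else val) 0

-- ===== PORT B =====
def pvAffineStep (mc : Int × Int) (p : String × Int) : Int × Int :=
  if p.1 == "+" then (mc.1, mc.2 + mc.1 * p.2)
  else if p.1 == "-" then (mc.1, mc.2 - mc.1 * p.2)
  else if p.1 == "*" then (mc.1 * p.2, mc.2)
  else mc

def eval_ops_alt (ops : List (String × Int)) : Int :=
  (ops.reverse.foldl pvAffineStep (1, 0)).2

-- ===== PRECONDITION & SPEC =====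
def Spec_eval_ops (ops : List (String × Int)) (out : Int) : Prop := out = eval_ops_alt ops
instance (ops : List (String × Int)) (out : Int) : Decidable (Spec_eval_ops ops out) := by unfold Spec_eval_ops; infer_instance

-- ===== CLAIM (what is proved, stated in full; the proofs are below) =====
def Claim_equal_eval_ops : Prop := ∀ (ops : List (String × Int)), Dom_eval_ops ops → Spec_eval_ops ops (eval_ops ops)

-- ===== LEMMAS AND PROOFS =====
-- A's forward fold from any start v equals the composed affine map applied to v.
theorem foldl_affine (ops : List (String × Int)) (v : Int) :
    ops.foldl (fun val p =>
      if p.1 == "+" then val + p.2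
      else if p.1 == "-" then val - p.2
      else if p.1 == "*" then val * p.2
      else val) v
      = (ops.foldr (fun p mc => pvAffineStep mc p) (1, 0)).1 * v
        + (ops.foldr (fun p mc => pvAffineStep mc p) (1, 0)).2 := by
  induction ops generalizing v with
  | nil => simp
  | cons hd tl ih =>
    simp only [List.foldl_cons, List.foldr_cons]
    rw [ih]
    simp only [pvAffineStep]
    split_ifs <;> simp <;> ring

-- ===== VERDICT (by name: the statement is the Claim_ definition above) =====
theorem eval_ops_spec : Claim_equal_eval_ops := by
  intro ops _
  unfold Spec_eval_ops eval_ops eval_ops_alt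
  rw [List.foldl_reverse, foldl_affine]
  ring
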